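-- pv_equiv track=rewrite | github.com/SampsonEzieme/ECS-10 | Program 3/prog3.py | productOfPowersOf2
-- ===== SOURCE A (Python) =====
-- def productOfPowersOf2(exp1, exp2):
--     """This function takes two numbers and calculates the product,
--     from multiplying all of the powers of 2 from the first given number to the last."""
--
--     counter = 0
--     number = 1
--     while counter <= exp2:
--         if exp1 <= counter:
--             number = (2**counter) * number
--         counter = counter + 1
--     return number
-- ===== SOURCE B (Python) =====
-- def productOfPowersOf2(exp1, exp2):
--     """Product of 2**k for k from exp1 (clamped to 0) through exp2,
--     computed as a single power of 2 with a Gauss-sum exponent."""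
--     lo = exp1 if exp1 > 0 else 0
--     if exp2 < lo:
--         return 1
--     return 2 ** ((exp2 * (exp2 + 1) - lo * (lo - 1)) // 2)
-- ===== Notes on version B (the rewrite author's own statement) =====
-- stated objective: alternative
-- what changed: Replaces the counter loop of repeated bignum multiplications by a closed-form arithmetic-series exponent and a single 2**sum; the output bignum itself dominates cost on large inputs, so a timing run could not confirm a speed-up.
import Mathlib
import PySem

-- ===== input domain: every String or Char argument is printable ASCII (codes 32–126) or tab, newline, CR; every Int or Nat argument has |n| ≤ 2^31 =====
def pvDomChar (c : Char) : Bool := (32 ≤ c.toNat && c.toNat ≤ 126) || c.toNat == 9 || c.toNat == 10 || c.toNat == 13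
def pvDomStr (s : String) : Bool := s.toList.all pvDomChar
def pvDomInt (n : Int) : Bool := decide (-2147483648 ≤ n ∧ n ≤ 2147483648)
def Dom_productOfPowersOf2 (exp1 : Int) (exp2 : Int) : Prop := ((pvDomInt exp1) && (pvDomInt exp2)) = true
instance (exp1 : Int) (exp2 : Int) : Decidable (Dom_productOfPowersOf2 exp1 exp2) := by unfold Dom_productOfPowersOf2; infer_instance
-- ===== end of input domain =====

-- B replaces A's counter loop of bignum multiplications by a closed-form
-- arithmetic-series exponent and a single power of 2 (objective: alternative).

-- ===== PORT A =====
-- the while loop: counter starts at 0 (hence nonnegative throughout, so 2^counter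
-- is ported as 2 ^ counter.toNat, exact here)
def pvALoop (exp1 exp2 counter number : Int) : Int :=
  if _h : counter ≤ exp2 then
    pvALoop exp1 exp2 (counter + 1)
      (if exp1 ≤ counter then (2 ^ counter.toNat) * number else number)
  else number
termination_by (exp2 + 1 - counter).toNat
decreasing_by omega

def productOfPowersOf2 (exp1 : Int) (exp2 : Int) : Int :=
  pvALoop exp1 exp2 0 1

-- ===== PORT B =====
def productOfPowersOf2_alt (exp1 : Int) (exp2 : Int) : Int :=
  let lo : Int := if exp1 > 0 then exp1 else 0
  if exp2 < lo then 1
  else 2 ^ (PySem.Int.floordiv (exp2 * (exp2 + 1) - lo * (lo - 1)) 2).toNat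

-- ===== PRECONDITION & SPEC =====
def Spec_productOfPowersOf2 (exp1 : Int) (exp2 : Int) (out : Int) : Prop := out = productOfPowersOf2_alt exp1 exp2
instance (exp1 : Int) (exp2 : Int) (out : Int) : Decidable (Spec_productOfPowersOf2 exp1 exp2 out) := by unfold Spec_productOfPowersOf2; infer_instance

-- ===== CLAIM (what is proved, stated in full; the proofs are below) =====
def Claim_equal_productOfPowersOf2 : Prop := ∀ (exp1 : Int) (exp2 : Int), Dom_productOfPowersOf2 exp1 exp2 → Spec_productOfPowersOf2 exp1 exp2 (productOfPowersOf2 exp1 exp2)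

-- ===== LEMMAS AND PROOFS =====

-- exponent still to be accumulated when the loop is at `counter`
def pvRemExp (exp1 exp2 counter : Int) : Nat :=
  if exp2 < max exp1 counter then 0
  else ((exp2 * (exp2 + 1) - max exp1 counter * (max exp1 counter - 1)) / 2).toNat

lemma pvRemExp_step (exp1 exp2 counter : Int) (h0 : 0 ≤ counter) (hle : counter ≤ exp2)
    (hc : exp1 ≤ counter) :
    pvRemExp exp1 exp2 counter = pvRemExp exp1 exp2 (counter + 1) + counter.toNat := by
  unfold pvRemExp
  rw [max_eq_right hc, max_eq_right (by omega : exp1 ≤ counter + 1)]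
  obtain ⟨k, hk⟩ := Int.even_mul_succ_self exp2
  obtain ⟨j, hj0⟩ := Int.even_mul_succ_self (counter - 1)
  have hj : counter * (counter - 1) = j + j := by linear_combination hj0
  have hb : (counter + 1) * (counter + 1 - 1) = j + j + 2 * counter := by linear_combination hj0
  have key : 0 ≤ (exp2 - counter) * (exp2 + counter + 1) := mul_nonneg (by omega) (by omega)
  have hbound : j + j + 2 * counter ≤ k + k := by nlinarith [key, hk, hb]
  rw [hk, hb, hj, if_neg (by omega : ¬ exp2 < counter)]
  by_cases h2 : exp2 < counter + 1
  · rw [if_pos h2]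
    have hce : exp2 = counter := by omega
    subst hce
    have hlin : k + k = j + j + 2 * exp2 := by linear_combination hb - hk
    omega
  · rw [if_neg h2]
    omega

lemma pvRemExp_skip (exp1 exp2 counter : Int) (hc : ¬ exp1 ≤ counter) :
    pvRemExp exp1 exp2 counter = pvRemExp exp1 exp2 (counter + 1) := by
  unfold pvRemExp
  rw [max_eq_left (by omega : counter ≤ exp1), max_eq_left (by omega : counter + 1 ≤ exp1)]

lemma pvALoop_eq (n : Nat) : ∀ (exp1 exp2 counter number : Int),
    0 ≤ counter → (exp2 + 1 - counter).toNat = n →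
    pvALoop exp1 exp2 counter number = 2 ^ pvRemExp exp1 exp2 counter * number := by
  induction n with
  | zero =>
    intro exp1 exp2 counter number h0 hn
    have hgt : ¬ counter ≤ exp2 := by omega
    rw [pvALoop, dif_neg hgt]
    have hz : pvRemExp exp1 exp2 counter = 0 := by
      unfold pvRemExp
      have hlt : exp2 < max exp1 counter := lt_of_lt_of_le (by omega) (le_max_right _ _)
      simp [hlt]
    rw [hz]; ring
  | succ n ih =>
    intro exp1 exp2 counter number h0 hn
    have hle : counter ≤ exp2 := by omega
    rw [pvALoop, dif_pos hle, ih exp1 exp2 (counter + 1) _ (by omega) (by omega)]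
    by_cases hc : exp1 ≤ counter
    · rw [if_pos hc, pvRemExp_step exp1 exp2 counter h0 hle hc, pow_add]; ring
    · rw [if_neg hc, pvRemExp_skip exp1 exp2 counter hc]

-- ===== VERDICT (by name: the statement is the Claim_ definition above) =====
theorem productOfPowersOf2_spec : Claim_equal_productOfPowersOf2 := by
  intro exp1 exp2 _
  unfold Spec_productOfPowersOf2 productOfPowersOf2 productOfPowersOf2_alt
  rw [pvALoop_eq ((exp2 + 1 - 0).toNat) exp1 exp2 0 1 (by omega) rfl, mul_one]
  unfold pvRemExp
  have hlo : max exp1 0 = if exp1 > 0 then exp1 else 0 := by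
    split_ifs with h <;> omega
  simp only [← hlo]
  split_ifs with h
  · exact pow_zero 2
  · rw [PySem.Int.floordiv_eq_ediv_of_pos (by norm_num)]
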